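-- pv_equiv track=rewrite | github.com/animeshpanara/Comida_Work | final.py | printingfunc
-- ===== SOURCE A (Python) =====
-- def printingfunc(lis,key,y):
--     z=[]
--     for i in range(0,len(lis)):
--         z.append([])
--         '''for j in range(0,3):
--             z[i].append(0)
--         '''
--     for i in range(0,len(lis)):
--         j=0
--         while j<len(y[i]):
--             if y[i][j]==1:
--                 if j>=0 and j<=3:
--                     z[i].append('non-veg')
--                     j=4
--                     continue
--                 if j>=4 and j<=7:
--                     z[i].append('veggies')
--                     j=8
--                     continue
--                 if j>=8 and j<=10:
--                     z[i].append('milk product')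
--                     j=11
--                     continue
--             j=j+1
--         if len(z[i])==0:
--             z[i].append('extras')
--     return lis,z;
-- ===== SOURCE B (Python) =====
-- def printingfunc(lis, key, y):
--     names = ('non-veg', 'veggies', 'milk product')
--     z = []
--     for i in range(len(lis)):
--         hit = [False, False, False]
--         for j, v in enumerate(y[i][:11]):
--             if v == 1:
--                 hit[j // 4] = True
--         labels = [name for h, name in zip(hit, names) if h]
--         z.append(labels if labels else ['extras'])
--     return lis, z
-- ===== Notes on version B (the rewrite author's own statement) =====
-- stated objective: alternative
-- what changed: Replaces A's single-cursor while loop with skip jumps by a single enumerate pass that accumulates a 3-flag zone array via the arithmetic classifier j//4, then assembles the labels from the flags with zip.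
import Mathlib
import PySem

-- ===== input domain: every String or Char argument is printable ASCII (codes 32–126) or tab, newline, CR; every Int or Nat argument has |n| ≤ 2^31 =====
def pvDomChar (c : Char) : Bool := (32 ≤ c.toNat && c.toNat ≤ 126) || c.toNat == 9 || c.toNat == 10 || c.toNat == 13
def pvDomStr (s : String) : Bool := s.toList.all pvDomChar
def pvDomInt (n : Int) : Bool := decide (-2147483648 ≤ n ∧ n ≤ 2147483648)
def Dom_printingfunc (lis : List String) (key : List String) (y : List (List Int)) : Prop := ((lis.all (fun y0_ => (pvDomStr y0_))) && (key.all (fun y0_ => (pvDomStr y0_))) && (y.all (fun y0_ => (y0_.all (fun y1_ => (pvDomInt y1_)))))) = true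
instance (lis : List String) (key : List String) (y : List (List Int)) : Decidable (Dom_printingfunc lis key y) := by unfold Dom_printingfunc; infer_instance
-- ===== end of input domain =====

-- B replaces A's single-cursor-with-skip while loop by one enumerate pass that
-- accumulates three zone flags via j // 4, then assembles the labels (alternative
-- decomposition; same cost).

-- ===== PORT A =====
-- the while loop over cursor j with its skip jumps; acc is z[i] being appended to
def pvRowA (row : List Int) (j : Nat) (acc : List String) : List String :=
  if h : j < row.length then
    if row[j] = 1 then
      if j ≤ 3 then pvRowA row 4 (acc ++ ["non-veg"])
      else if j ≤ 7 then pvRowA row 8 (acc ++ ["veggies"])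
      else if j ≤ 10 then pvRowA row 11 (acc ++ ["milk product"])
      else pvRowA row (j + 1) acc
    else pvRowA row (j + 1) acc
  else acc
termination_by row.length - j
decreasing_by all_goals omega

def printingfunc (lis : List String) (key : List String) (y : List (List Int)) : List String × List (List String) :=
  (lis, (List.range lis.length).map (fun i =>
    let zi := pvRowA (y.getD i []) 0 []
    if zi = [] then ["extras"] else zi))

-- ===== PORT B =====
def pvNames : List String := ["non-veg", "veggies", "milk product"]

-- the inner 'for j, v in enumerate(row[:11]): if v == 1: hit[j // 4] = True'
def pvScan (l : List (Int × Int)) (hit : List Bool) : List Bool :=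
  l.foldl (fun h p => if p.2 = 1 then h.set (PySem.Int.floordiv p.1 4).toNat true else h) hit

def pvRowB (row : List Int) : List String :=
  let hit := pvScan (PySem.List.enumerate (row.take 11) 0) [false, false, false]
  let labels := ((hit.zip pvNames).filter (·.1)).map (·.2)
  if labels = [] then ["extras"] else labels

def printingfunc_alt (lis : List String) (key : List String) (y : List (List Int)) : List String × List (List String) :=
  (lis, (List.range lis.length).map (fun i => pvRowB (y.getD i [])))

-- ===== PRECONDITION & SPEC =====
-- Both Pythons raise IndexError on y[i] when y is shorter than lis; Pre_ excludes exactly that.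
def Pre_printingfunc (lis : List String) (key : List String) (y : List (List Int)) : Prop :=
  lis.length ≤ y.length
instance (lis : List String) (key : List String) (y : List (List Int)) : Decidable (Pre_printingfunc lis key y) := by unfold Pre_printingfunc; infer_instance

def pvWitness_printingfunc : List String × List String × List (List Int) :=
  (["a", "b"], ["k"], [[0, 1, 0, 0, 1], [0, 0, 0, 0, 0, 0, 0, 0, 1]])

def Spec_printingfunc (lis : List String) (key : List String) (y : List (List Int)) (out : List String × List (List String)) : Prop := out = printingfunc_alt lis key y
instance (lis : List String) (key : List String) (y : List (List Int)) (out : List String × List (List String)) : Decidable (Spec_printingfunc lis key y out) := by unfold Spec_printingfunc; infer_instance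

-- ===== CLAIM (what is proved, stated in full; the proofs are below) =====
def Claim_equal_printingfunc : Prop := ∀ (lis : List String) (key : List String) (y : List (List Int)), Dom_printingfunc lis key y → Pre_printingfunc lis key y → Spec_printingfunc lis key y (printingfunc lis key y)

-- ===== LEMMAS AND PROOFS =====

-- A side: the accumulator only collects, pull it out front
theorem pvRowA_acc (row : List Int) (j : Nat) (acc : List String) :
    pvRowA row j acc = acc ++ pvRowA row j [] := by
  induction hn : row.length - j using Nat.strong_induction_on generalizing j acc with
  | _ n ih =>
    rw [pvRowA]; conv_rhs => rw [pvRowA]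
    by_cases h : j < row.length
    · simp only [dif_pos h]
      by_cases hv : row[j] = 1
      · by_cases h3 : j ≤ 3
        · simp only [if_pos hv, if_pos h3]
          rw [ih _ (by omega) 4 (acc ++ ["non-veg"]) rfl, ih _ (by omega) 4 ([] ++ ["non-veg"]) rfl]
          simp
        · by_cases h7 : j ≤ 7
          · simp only [if_pos hv, if_neg h3, if_pos h7]
            rw [ih _ (by omega) 8 (acc ++ ["veggies"]) rfl, ih _ (by omega) 8 ([] ++ ["veggies"]) rfl]
            simp
          · by_cases h10 : j ≤ 10
            · simp only [if_pos hv, if_neg h3, if_neg h7, if_pos h10]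
              rw [ih _ (by omega) 11 (acc ++ ["milk product"]) rfl,
                  ih _ (by omega) 11 ([] ++ ["milk product"]) rfl]
              simp
            · simp only [if_pos hv, if_neg h3, if_neg h7, if_neg h10]
              exact ih _ (by omega) (j + 1) acc rfl
      · simp only [if_neg hv]
        exact ih _ (by omega) (j + 1) acc rfl
    · simp [dif_neg h]

theorem pvRowA_out (row : List Int) (j : Nat) (acc : List String) (h : row.length ≤ j) :
    pvRowA row j acc = acc := by
  rw [pvRowA]; simp [Nat.not_lt.mpr h]

-- past all zones the loop only increments and appends nothing
theorem pvRowA_tail (row : List Int) (j : Nat) (h : 11 ≤ j) :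
    pvRowA row j [] = [] := by
  induction hn : row.length - j using Nat.strong_induction_on generalizing j with
  | _ n ih =>
    rw [pvRowA]
    by_cases hle : j < row.length
    · simp only [dif_pos hle]
      have h3 : ¬ j ≤ 3 := by omega
      have h7 : ¬ j ≤ 7 := by omega
      have h10 : ¬ j ≤ 10 := by omega
      by_cases hv : row[j] = 1 <;>
        simp only [if_pos, hv, h3, h7, h10, if_false] <;>
        exact ih (row.length - (j + 1)) (by omega) (j + 1) (by omega) rfl
    · simp [dif_neg hle]

theorem pvRowA_zone3 (row : List Int) (j : Nat) (h8 : 8 ≤ j) (h11 : j ≤ 11) :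
    pvRowA row j [] =
      (if (1 : Int) ∈ (row.drop j).take (11 - j) then ["milk product"] else []) := by
  induction hn : 11 - j using Nat.strong_induction_on generalizing j with
  | _ n ih =>
    subst hn
    rcases Nat.eq_or_lt_of_le h11 with h | hlt
    · subst h; simp [pvRowA_tail row 11 le_rfl]
    · rw [pvRowA]
      by_cases hle : j < row.length
      · have hdrop : row.drop j = row[j] :: row.drop (j + 1) := (List.getElem_cons_drop hle).symm
        have htake : (row.drop j).take (11 - j) = row[j] :: (row.drop (j + 1)).take (11 - (j + 1)) := by
          rw [hdrop]; rw [show 11 - j = (11 - (j + 1)) + 1 by omega]; rfl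
        simp only [dif_pos hle]
        by_cases hv : row[j] = 1
        · have h3 : ¬ j ≤ 3 := by omega
          have h7 : ¬ j ≤ 7 := by omega
          have h10 : j ≤ 10 := by omega
          simp only [if_pos hv, if_neg h3, if_neg h7, if_pos h10]
          rw [pvRowA_acc, pvRowA_tail row 11 le_rfl, htake, hv]
          simp
        · simp only [if_neg hv]
          rw [ih (11 - (j + 1)) (by omega) (j + 1) (by omega) (by omega) rfl, htake]
          simp [Ne.symm hv]
      · rw [dif_neg hle]
        rw [List.drop_eq_nil_of_le (by omega)]
        simp

theorem pvRowA_zone2 (row : List Int) (j : Nat) (h4 : 4 ≤ j) (h8 : j ≤ 8) :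
    pvRowA row j [] =
      (if (1 : Int) ∈ (row.drop j).take (8 - j) then ["veggies"] else []) ++ pvRowA row 8 [] := by
  induction hn : 8 - j using Nat.strong_induction_on generalizing j with
  | _ n ih =>
    subst hn
    rcases Nat.eq_or_lt_of_le h8 with h | hlt
    · subst h; simp
    · rw [pvRowA]
      by_cases hle : j < row.length
      · have hdrop : row.drop j = row[j] :: row.drop (j + 1) := (List.getElem_cons_drop hle).symm
        have htake : (row.drop j).take (8 - j) = row[j] :: (row.drop (j + 1)).take (8 - (j + 1)) := by
          rw [hdrop]; rw [show 8 - j = (8 - (j + 1)) + 1 by omega]; rfl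
        simp only [dif_pos hle]
        by_cases hv : row[j] = 1
        · have h3 : ¬ j ≤ 3 := by omega
          have h7 : j ≤ 7 := by omega
          simp only [if_pos hv, if_neg h3, if_pos h7]
          rw [pvRowA_acc, htake, hv]
          simp
        · simp only [if_neg hv]
          rw [ih (8 - (j + 1)) (by omega) (j + 1) (by omega) (by omega) rfl, htake]
          simp [Ne.symm hv]
      · rw [dif_neg hle]
        rw [List.drop_eq_nil_of_le (by omega), pvRowA_out row 8 [] (by omega)]
        simp

theorem pvRowA_zone1 (row : List Int) (j : Nat) (h4 : j ≤ 4) :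
    pvRowA row j [] =
      (if (1 : Int) ∈ (row.drop j).take (4 - j) then ["non-veg"] else []) ++ pvRowA row 4 [] := by
  induction hn : 4 - j using Nat.strong_induction_on generalizing j with
  | _ n ih =>
    subst hn
    rcases Nat.eq_or_lt_of_le h4 with h | hlt
    · subst h; simp
    · rw [pvRowA]
      by_cases hle : j < row.length
      · have hdrop : row.drop j = row[j] :: row.drop (j + 1) := (List.getElem_cons_drop hle).symm
        have htake : (row.drop j).take (4 - j) = row[j] :: (row.drop (j + 1)).take (4 - (j + 1)) := by
          rw [hdrop]; rw [show 4 - j = (4 - (j + 1)) + 1 by omega]; rfl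
        simp only [dif_pos hle]
        by_cases hv : row[j] = 1
        · have h3 : j ≤ 3 := by omega
          simp only [if_pos hv, if_pos h3]
          rw [pvRowA_acc, htake, hv]
          simp
        · simp only [if_neg hv]
          rw [ih (4 - (j + 1)) (by omega) (j + 1) (by omega) rfl, htake]
          simp [Ne.symm hv]
      · rw [dif_neg hle]
        rw [List.drop_eq_nil_of_le (by omega), pvRowA_out row 4 [] (by omega)]
        simp

-- A's per-row loop computes exactly the three zone slices, in order
theorem pvRowA_eq (row : List Int) :
    pvRowA row 0 [] =
      (if (1 : Int) ∈ row.take 4 then ["non-veg"] else []) ++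
      (if (1 : Int) ∈ (row.drop 4).take 4 then ["veggies"] else []) ++
      (if (1 : Int) ∈ (row.drop 8).take 3 then ["milk product"] else []) := by
  rw [pvRowA_zone1 row 0 (by omega), pvRowA_zone2 row 4 le_rfl (by omega),
      pvRowA_zone3 row 8 le_rfl (by omega)]
  simp

-- B side: the zone predicate a flag accumulates
def pvZone (lo hi : Nat) (p : Int × Int) : Bool :=
  decide (p.2 = 1 ∧ (lo : Int) ≤ p.1 ∧ p.1 < (hi : Int))

-- the fold result: each flag becomes 'was it set, or does any element of its zone hit'
theorem pvScan_spec (l : List (Int × Int)) (hb : ∀ p ∈ l, 0 ≤ p.1 ∧ p.1 < 11)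
    (a b c : Bool) :
    pvScan l [a, b, c] =
      [a || l.any (pvZone 0 4), b || l.any (pvZone 4 8), c || l.any (pvZone 8 11)] := by
  induction l generalizing a b c with
  | nil => simp [pvScan]
  | cons p t ih =>
    obtain ⟨j, v⟩ := p
    have hbt : ∀ q ∈ t, 0 ≤ q.1 ∧ q.1 < 11 := fun q hq => hb q (List.mem_cons_of_mem _ hq)
    have hj := hb (j, v) (List.mem_cons_self ..)
    simp only [pvScan, List.foldl_cons] at ih ⊢
    by_cases hv : v = 1
    · simp only [if_pos hv]
      rcases (show j < 4 ∨ (4 ≤ j ∧ j < 8) ∨ 8 ≤ j by omega) with h | h | h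
      · have hd : PySem.Int.floordiv j 4 = 0 :=
          (PySem.Int.floordiv_eq_iff_of_pos (by omega)).2 (by omega)
        have hset : [a, b, c].set (PySem.Int.floordiv j 4).toNat true = [true, b, c] := by
          rw [hd]; rfl
        rw [hset, ih hbt]
        have e0 : pvZone 0 4 (j, v) = true := by simp [pvZone, hv]; omega
        have e1 : pvZone 4 8 (j, v) = false := by simp [pvZone, hv]; omega
        have e2 : pvZone 8 11 (j, v) = false := by simp [pvZone, hv]; omega
        simp [List.any_cons, e0, e1, e2]
      · have hd : PySem.Int.floordiv j 4 = 1 :=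
          (PySem.Int.floordiv_eq_iff_of_pos (by omega)).2 (by omega)
        have hset : [a, b, c].set (PySem.Int.floordiv j 4).toNat true = [a, true, c] := by
          rw [hd]; rfl
        rw [hset, ih hbt]
        have e0 : pvZone 0 4 (j, v) = false := by simp [pvZone, hv]; omega
        have e1 : pvZone 4 8 (j, v) = true := by simp [pvZone, hv]; omega
        have e2 : pvZone 8 11 (j, v) = false := by simp [pvZone, hv]; omega
        simp [List.any_cons, e0, e1, e2]
      · have hd : PySem.Int.floordiv j 4 = 2 :=
          (PySem.Int.floordiv_eq_iff_of_pos (by omega)).2 (by omega)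
        have hset : [a, b, c].set (PySem.Int.floordiv j 4).toNat true = [a, b, true] := by
          rw [hd]; rfl
        rw [hset, ih hbt]
        have e0 : pvZone 0 4 (j, v) = false := by simp [pvZone, hv]; omega
        have e1 : pvZone 4 8 (j, v) = false := by simp [pvZone, hv]; omega
        have e2 : pvZone 8 11 (j, v) = true := by simp [pvZone, hv]; omega
        simp [List.any_cons, e0, e1, e2]
    · simp only [if_neg hv]
      rw [ih hbt]
      simp [List.any_cons, pvZone, hv]

-- every index produced by enumerate(row[:11]) lies in [0, 11)
theorem pvEnum_bounds (row : List Int) :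
    ∀ p ∈ PySem.List.enumerate (row.take 11) 0, 0 ≤ p.1 ∧ p.1 < 11 := by
  intro p hp
  rw [PySem.List.mem_enumerate_iff] at hp
  obtain ⟨k, hk, rfl⟩ := hp
  have : k < 11 := lt_of_lt_of_le hk (by simpa using List.length_take_le 11 row)
  constructor
  · simp
  · simp; omega

-- the zone test over enumerate(row[:11]) is membership of 1 in the zone's slice
theorem pvAny_zone (row : List Int) (lo hi : Nat) (hihi : hi ≤ 11) :
    (PySem.List.enumerate (row.take 11) 0).any (pvZone lo hi)
      = decide ((1 : Int) ∈ (row.drop lo).take (hi - lo)) := by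
  rw [Bool.eq_iff_iff]
  simp only [List.any_eq_true, PySem.List.mem_enumerate_iff, pvZone, decide_eq_true_eq]
  constructor
  · rintro ⟨p, ⟨k, hk, rfl⟩, h1, hlo, hhi⟩
    simp only [zero_add] at h1 hlo hhi
    have hklo : lo ≤ k := by exact_mod_cast hlo
    have hkhi : k < hi := by exact_mod_cast hhi
    have hkr : k < row.length := by rw [List.length_take] at hk; omega
    rw [List.getElem_take] at h1
    rw [List.mem_iff_getElem?]
    refine ⟨k - lo, ?_⟩
    rw [List.getElem?_take_of_lt (by omega), List.getElem?_drop,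
        show lo + (k - lo) = k by omega, List.getElem?_eq_getElem hkr, h1]
  · intro hmem
    rw [List.mem_iff_getElem?] at hmem
    obtain ⟨i, hvi⟩ := hmem
    obtain ⟨hlen, hval⟩ := List.getElem?_eq_some_iff.mp hvi
    have hbnd : i < hi - lo ∧ lo + i < row.length := by
      simp [List.length_take, List.length_drop] at hlen; omega
    have hk11 : lo + i < (row.take 11).length := by rw [List.length_take]; omega
    rw [List.getElem_take, List.getElem_drop] at hval
    refine ⟨(((lo + i : Nat) : Int), (row.take 11)[lo + i]), ⟨lo + i, hk11, by simp⟩, ?_, ?_, ?_⟩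
    · show (row.take 11)[lo + i] = 1
      rw [List.getElem_take]; exact hval
    · show (lo : Int) ≤ ((lo + i : Nat) : Int); push_cast; omega
    · show ((lo + i : Nat) : Int) < (hi : Int); push_cast; omega

-- B's per-row computation equals A's
theorem pvRowB_eq (row : List Int) :
    pvRowB row = (let zi := pvRowA row 0 []; if zi = [] then ["extras"] else zi) := by
  show pvRowB row = (if pvRowA row 0 [] = [] then ["extras"] else pvRowA row 0 [])
  rw [pvRowA_eq]
  simp only [pvRowB]
  rw [pvScan_spec _ (pvEnum_bounds row),
      pvAny_zone row 0 4 (by omega), pvAny_zone row 4 8 (by omega),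
      pvAny_zone row 8 11 (by omega)]
  simp only [List.drop_zero, Bool.false_or, show (4 - 0 : Nat) = 4 from rfl,
    show (11 - 8 : Nat) = 3 from rfl]
  by_cases h0 : (1 : Int) ∈ row.take 4 <;>
    by_cases h1 : (1 : Int) ∈ (row.drop 4).take 4 <;>
      by_cases h2 : (1 : Int) ∈ (row.drop 8).take 3 <;>
        simp [h0, h1, h2, pvNames]

-- ===== VERDICT (by name: the statement is the Claim_ definition above) =====
theorem printingfunc_spec : Claim_equal_printingfunc := by
  intro lis key y _ _
  show _ = _
  unfold printingfunc printingfunc_alt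
  refine congrArg _ (List.map_congr_left fun i _ => ?_)
  rw [pvRowB_eq]
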